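-- pv_equiv track=rewrite | github.com/WayneGreeley/strands-synonym-game | backend/src/hint_provider_agent.py | _is_related_concept
-- ===== SOURCE A (Python) =====
-- def _is_related_concept(guess: str, target: str) -> bool:
--     """Check if guess is a related concept to target."""
--     # Simple heuristic: check for common word patterns or categories
--     emotion_words = ["happy", "sad", "angry", "excited", "calm", "worried"]
--     size_words = ["big", "small", "large", "tiny", "huge", "little"]
--     speed_words = ["fast", "slow", "quick", "rapid", "sluggish"]
--     temperature_words = ["hot", "cold", "warm", "cool", "freezing", "boiling"]
--
--     categories = [emotion_words, size_words, speed_words, temperature_words]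
--
--     for category in categories:
--         if target in category and guess in category:
--             return True
--
--     return False
-- ===== SOURCE B (Python) =====
-- _CATEGORIES = {
--     "emotion": ["happy", "sad", "angry", "excited", "calm", "worried"],
--     "size": ["big", "small", "large", "tiny", "huge", "little"],
--     "speed": ["fast", "slow", "quick", "rapid", "sluggish"],
--     "temperature": ["hot", "cold", "warm", "cool", "freezing", "boiling"],
-- }
--
-- _WORD_CATEGORY = {word: label for label, words in _CATEGORIES.items() for word in words}
--
--
-- def _is_related_concept(guess: str, target: str) -> bool:
--     """Check if guess is a related concept to target."""
--     category = _WORD_CATEGORY.get(guess)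
--     return category is not None and category == _WORD_CATEGORY.get(target)
-- ===== Notes on version B (the rewrite author's own statement) =====
-- stated objective: idiomatic
-- what changed: Replaces the per-category membership loop by a word-to-category dict built once from the category lists; the function is then just two lookups compared for equality.
import Mathlib
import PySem

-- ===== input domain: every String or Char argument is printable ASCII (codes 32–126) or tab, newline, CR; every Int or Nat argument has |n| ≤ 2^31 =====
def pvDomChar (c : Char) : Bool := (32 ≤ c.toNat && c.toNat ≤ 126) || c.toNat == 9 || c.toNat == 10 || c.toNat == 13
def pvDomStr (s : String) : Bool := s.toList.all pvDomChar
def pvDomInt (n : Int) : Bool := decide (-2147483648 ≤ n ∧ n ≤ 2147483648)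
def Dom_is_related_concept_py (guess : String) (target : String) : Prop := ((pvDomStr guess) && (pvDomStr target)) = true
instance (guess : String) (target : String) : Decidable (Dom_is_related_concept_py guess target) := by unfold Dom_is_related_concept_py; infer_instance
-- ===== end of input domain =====

-- B replaces A's per-category membership loop by a precomputed word→category index consulted with
-- two lookups (objective: idiomatic; no speed claim).

-- ===== PORT A =====
-- the four hardcoded category lists, in A's order
def pvCategories : List (List String) :=
  [["happy", "sad", "angry", "excited", "calm", "worried"],
   ["big", "small", "large", "tiny", "huge", "little"],
   ["fast", "slow", "quick", "rapid", "sluggish"],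
   ["hot", "cold", "warm", "cool", "freezing", "boiling"]]

-- the 'for category in categories' loop with its early 'return True'
def pvCatLoop (cats : List (List String)) (guess target : String) : Bool :=
  match cats with
  | [] => false
  | c :: rest => if c.contains target && c.contains guess then true else pvCatLoop rest guess target

def is_related_concept_py (guess : String) (target : String) : Bool :=
  pvCatLoop pvCategories guess target

-- ===== PORT B =====
-- B's module-level dict comprehension {word: label …}, written out (all keys distinct)
def pvWordCategory : PySem.Dict String String :=
  PySem.Dict.ofList
    [("happy", "emotion"), ("sad", "emotion"), ("angry", "emotion"),
     ("excited", "emotion"), ("calm", "emotion"), ("worried", "emotion"),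
     ("big", "size"), ("small", "size"), ("large", "size"),
     ("tiny", "size"), ("huge", "size"), ("little", "size"),
     ("fast", "speed"), ("slow", "speed"), ("quick", "speed"),
     ("rapid", "speed"), ("sluggish", "speed"),
     ("hot", "temperature"), ("cold", "temperature"), ("warm", "temperature"),
     ("cool", "temperature"), ("freezing", "temperature"), ("boiling", "temperature")]

def is_related_concept_py_alt (guess : String) (target : String) : Bool :=
  match pvWordCategory.get? guess with
  | none => false
  | some c => pvWordCategory.get? target == some c

-- ===== PRECONDITION & SPEC =====
def Spec_is_related_concept_py (guess : String) (target : String) (out : Bool) : Prop := out = is_related_concept_py_alt guess target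
instance (guess : String) (target : String) (out : Bool) : Decidable (Spec_is_related_concept_py guess target out) := by unfold Spec_is_related_concept_py; infer_instance

-- ===== CLAIM (what is proved, stated in full; the proofs are below) =====
def Claim_equal_is_related_concept_py : Prop := ∀ (guess : String) (target : String), Dom_is_related_concept_py guess target → Spec_is_related_concept_py guess target (is_related_concept_py guess target)

-- ===== LEMMAS AND PROOFS =====

-- all 23 category words
def pvAllWords : List String :=
  ["happy", "sad", "angry", "excited", "calm", "worried",
   "big", "small", "large", "tiny", "huge", "little",
   "fast", "slow", "quick", "rapid", "sluggish",
   "hot", "cold", "warm", "cool", "freezing", "boiling"]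

theorem pvA_false_of_target_not_word (guess target : String) (ht : target ∉ pvAllWords) :
    is_related_concept_py guess target = false := by
  simp [pvAllWords] at ht
  simp [is_related_concept_py, pvCatLoop, pvCategories, List.contains_eq_mem, ht]

theorem pvA_false_of_guess_not_word (guess target : String) (hg : guess ∉ pvAllWords) :
    is_related_concept_py guess target = false := by
  simp [pvAllWords] at hg
  simp [is_related_concept_py, pvCatLoop, pvCategories, List.contains_eq_mem, hg]

theorem pvB_get?_none (w : String) (hw : w ∉ pvAllWords) :
    pvWordCategory.get? w = none := by
  rw [PySem.Dict.get?_eq_none_iff_not_mem_keys]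
  have hk : pvWordCategory.keys = pvAllWords := by decide
  rw [hk]; exact hw

theorem pvBoth_words (guess target : String) (hg : guess ∈ pvAllWords) (ht : target ∈ pvAllWords) :
    is_related_concept_py guess target = is_related_concept_py_alt guess target := by
  have h : pvAllWords.all (fun g => pvAllWords.all (fun t =>
      is_related_concept_py g t == is_related_concept_py_alt g t)) = true := by decide
  rw [List.all_eq_true] at h
  have h2 := h guess hg
  rw [List.all_eq_true] at h2
  exact eq_of_beq (h2 target ht)

-- ===== VERDICT (by name: the statement is the Claim_ definition above) =====
theorem is_related_concept_py_spec : Claim_equal_is_related_concept_py := by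
  intro guess target _
  unfold Spec_is_related_concept_py
  by_cases hg : guess ∈ pvAllWords
  · by_cases ht : target ∈ pvAllWords
    · exact pvBoth_words guess target hg ht
    · rw [pvA_false_of_target_not_word guess target ht]
      unfold is_related_concept_py_alt
      rw [pvB_get?_none target ht]
      cases pvWordCategory.get? guess <;> rfl
  · rw [pvA_false_of_guess_not_word guess target hg]
    unfold is_related_concept_py_alt
    rw [pvB_get?_none guess hg]
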